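-- pv_equiv track=rewrite | github.com/MatthewBaggins/nomolog | src/consistency.py | bin_strings
-- ===== SOURCE A (Python) =====
-- import itertools as it
--
-- def bin_strings(n: int) -> list[list[bool]]:  # of length n
--     strings: list[list[bool]] = []
--     for x in range(n + 1):
--         # y = n - x
--         for idxs in it.combinations(range(n), x):
--             s: list[bool] = [False] * n
--             for i in idxs:
--                 s[i] = True
--             strings.append(s)
--     return strings
-- ===== SOURCE B (Python) =====
-- def _groups(n: int) -> list[list[list[bool]]]:
--     # _groups(n)[k] = all length-n strings with k Trues, in A's (combination-lex) order
--     if n == 0: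
--         return [[[]]]
--     prev = _groups(n - 1)
--     return [
--         ([[True] + s for s in prev[k - 1]] if k >= 1 else [])
--         + ([[False] + s for s in prev[k]] if k <= n - 1 else [])
--         for k in range(n + 1)
--     ]
--
-- def bin_strings(n: int) -> list[list[bool]]:  # of length n
--     if n < 0:
--         return []
--     return [s for row in _groups(n) for s in row]
-- ===== Notes on version B (the rewrite author's own statement) =====
-- stated objective: alternative
-- what changed: Replaces the nested itertools.combinations loops with index-setting by a Pascal-triangle-style recursion that builds each popcount group of length n directly from the groups of length n-1 by prefixing True/False.
import Mathlib
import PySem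

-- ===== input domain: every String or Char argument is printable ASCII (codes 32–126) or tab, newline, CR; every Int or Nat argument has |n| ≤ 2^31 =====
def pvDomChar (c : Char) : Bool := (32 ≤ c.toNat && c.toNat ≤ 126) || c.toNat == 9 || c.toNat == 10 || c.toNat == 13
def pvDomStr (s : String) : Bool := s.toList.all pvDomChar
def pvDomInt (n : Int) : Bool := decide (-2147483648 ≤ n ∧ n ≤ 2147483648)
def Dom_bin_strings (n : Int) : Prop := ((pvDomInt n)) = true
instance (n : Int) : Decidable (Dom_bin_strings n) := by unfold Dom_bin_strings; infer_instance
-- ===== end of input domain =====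

-- B replaces A's grouped itertools.combinations loops by a Pascal-triangle-style
-- recursion building each popcount group of length n from the groups of length n-1 (objective: alternative).

-- ===== PORT A =====
-- itertools.combinations(l, k) in Python's lexicographic emission order
def combosA : Nat → List Nat → List (List Nat)
  | 0, _ => [[]]
  | _ + 1, [] => []
  | k + 1, x :: xs => (combosA k xs).map (x :: ·) ++ combosA (k + 1) xs

def bin_strings (n : Int) : List (List Bool) :=
  (PySem.List.pyRange 0 (n + 1) 1).foldl
    (fun strings x =>
      (combosA x.toNat (List.range n.toNat)).foldl
        (fun strings idxs =>
          strings ++ [idxs.foldl (fun s i => s.set i true) (List.replicate n.toNat false)])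
        strings)
    []

-- ===== PORT B =====
-- _groups(n)[k] = all length-n strings with k Trues, built from _groups(n-1)
def binGroups : Nat → List (List (List Bool))
  | 0 => [[[]]]
  | n + 1 =>
    let prev := binGroups n
    (List.range (n + 2)).map (fun k =>
      (if 1 ≤ k then (prev.getD (k - 1) []).map (true :: ·) else []) ++
      (if k ≤ n then (prev.getD k []).map (false :: ·) else []))

def bin_strings_alt (n : Int) : List (List Bool) :=
  if n < 0 then [] else (binGroups n.toNat).flatten

-- ===== PRECONDITION & SPEC =====
def Spec_bin_strings (n : Int) (out : List (List Bool)) : Prop := out = bin_strings_alt n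
instance (n : Int) (out : List (List Bool)) : Decidable (Spec_bin_strings n out) := by unfold Spec_bin_strings; infer_instance

-- ===== CLAIM (what is proved, stated in full; the proofs are below) =====
def Claim_equal_bin_strings : Prop := ∀ (n : Int), Dom_bin_strings n → Spec_bin_strings n (bin_strings n)

-- ===== LEMMAS AND PROOFS =====

-- the k-th popcount group as A builds it
def buildA (m k : Nat) : List (List Bool) :=
  (combosA k (List.range m)).map
    (fun idxs => idxs.foldl (fun s i => s.set i true) (List.replicate m false))

theorem combosA_map (f : Nat → Nat) : ∀ (k : Nat) (l : List Nat),
    combosA k (l.map f) = (combosA k l).map (List.map f)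
  | 0, _ => by simp [combosA]
  | _ + 1, [] => by simp [combosA]
  | k + 1, x :: xs => by
    simp [combosA, combosA_map f k xs, combosA_map f (k + 1) xs,
      List.map_map, Function.comp]

theorem combosA_nil_of_lt : ∀ (k : Nat) (l : List Nat), l.length < k → combosA k l = []
  | 0, _, h => by omega
  | _ + 1, [], _ => rfl
  | k + 1, x :: xs, h => by
    simp at h
    simp [combosA, combosA_nil_of_lt k xs (by omega),
      combosA_nil_of_lt (k + 1) xs (by omega)]

theorem foldl_set_shift (b : Bool) : ∀ (js : List Nat) (s : List Bool),
    (js.map Nat.succ).foldl (fun s i => s.set i true) (b :: s)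
      = b :: js.foldl (fun s i => s.set i true) s
  | [], _ => rfl
  | j :: js, s => by
    simp only [List.map_cons, List.foldl_cons, List.set]
    exact foldl_set_shift b js _

theorem buildA_zero (m : Nat) : buildA m 0 = [List.replicate m false] := by
  simp [buildA, combosA]

theorem buildA_of_lt (m k : Nat) (h : m < k) : buildA m k = [] := by
  simp [buildA, combosA_nil_of_lt k (List.range m) (by simpa using h)]

theorem buildA_succ_succ (m k : Nat) :
    buildA (m + 1) (k + 1)
      = (buildA m k).map (true :: ·) ++ (buildA m (k + 1)).map (false :: ·) := by
  have hr : List.range (m + 1) = 0 :: (List.range m).map Nat.succ :=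
    List.range_succ_eq_map
  simp only [buildA, hr, combosA, List.map_append, List.map_map, List.replicate_succ]
  congr 1
  · simp [combosA_map, List.map_map]
    intro js _
    exact foldl_set_shift true js _
  · simp [combosA_map, List.map_map]
    intro js _
    exact foldl_set_shift false js _

theorem getD_map_range' {α : Type} (f : Nat → α) (d : α) (n k : Nat) :
    (((List.range n).map f).getD k d) = if k < n then f k else d := by
  split
  · rw [List.getD_eq_getElem?_getD, List.getElem?_map]
    simp_all
  · rw [List.getD_eq_getElem?_getD, List.getElem?_map]
    have : (List.range n)[k]? = none := by
      rw [List.getElem?_eq_none_iff]; simpa using by omega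
    simp [this]

theorem binGroups_eq (m : Nat) :
    binGroups m = (List.range (m + 1)).map (buildA m) := by
  induction m with
  | zero => simp [binGroups, List.range_succ, buildA, combosA]
  | succ m ih =>
    show (List.range (m + 2)).map _ = _
    apply List.map_congr_left
    intro k hk
    simp only [List.mem_range] at hk
    rw [ih]
    match k with
    | 0 =>
      simp [buildA_zero, List.replicate_succ]
    | k + 1 =>
      rw [buildA_succ_succ]
      have h1 : k < m + 1 := by omega
      simp only [Nat.add_sub_cancel, getD_map_range', if_pos h1]
      congr 1
      split
      · rw [if_pos (by omega)]
      · rw [buildA_of_lt m (k + 1) (by omega)]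
        simp

theorem foldl_step_flatten {α β : Type} (F : List β → α → List β) (g : α → List β)
    (h : ∀ acc x, F acc x = acc ++ g x) :
    ∀ (l : List α) (acc : List β), l.foldl F acc = acc ++ (l.map g).flatten
  | [], acc => by simp
  | x :: l, acc => by
    simp [List.foldl_cons, h, foldl_step_flatten F g h l, List.append_assoc]

-- ===== VERDICT (by name: the statement is the Claim_ definition above) =====
theorem bin_strings_spec : Claim_equal_bin_strings := by
  intro n _
  show bin_strings n = bin_strings_alt n
  unfold bin_strings bin_strings_alt
  by_cases hn : n < 0
  · rw [PySem.List.pyRange_one_eq_nil (by omega), if_pos hn]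
    rfl
  · rw [if_neg hn]
    rw [PySem.List.pyRange_one, binGroups_eq]
    have hlen : (n + 1 - 0).toNat = n.toNat + 1 := by omega
    rw [hlen]
    rw [foldl_step_flatten _ (fun x : Int => buildA n.toNat x.toNat)
      (by
        intro acc x
        simp only [buildA]
        exact PySem.List.foldl_append_singleton_eq_map _ _ _)]
    simp only [List.nil_append, List.map_map]
    congr 1
    apply List.map_congr_left
    intro k _
    simp [Function.comp]
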